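-- pv_equiv track=rewrite | github.com/Badokk/AdventOfCode18 | Python/Day_2/functions.py | countWordsWithDoubleAndTripleChars
-- ===== SOURCE A (Python) =====
-- def analiseWord(word):
--     word = sorted(word)
--
--     # Now, options are:
--     # - iterate over the word with a counter
--     # - cut string into pieces
--     has_two_of_a_kind = False
--     has_three_of_a_kind = False
--     uniqueCharacters = set(word)
--     for char in uniqueCharacters:
--         count = word.count(char)
--         if count == 2:
--             has_two_of_a_kind = True
--         if count == 3:
--             has_three_of_a_kind = True
--
--     return has_two_of_a_kind, has_three_of_a_kind
--
-- def countWordsWithDoubleAndTripleChars(words):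
--     doubles = 0
--     triples = 0
--     for word in words:
--         has_two, has_three = analiseWord(word)
--         doubles += int(has_two)
--         triples += int(has_three)
--
--     return doubles, triples
-- ===== SOURCE B (Python) =====
-- def countWordsWithDoubleAndTripleChars(words):
--     doubles = 0
--     triples = 0
--     for word in words:
--         has_two = False
--         has_three = False
--         prev = None
--         run = 0
--         for ch in sorted(word):
--             if ch == prev:
--                 run += 1
--             else:
--                 if run == 2:
--                     has_two = True
--                 if run == 3:
--                     has_three = True
--                 prev = ch
--                 run = 1
--         if run == 2:
--             has_two = True
--         if run == 3:
--             has_three = True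
--         doubles += int(has_two)
--         triples += int(has_three)
--     return doubles, triples
-- ===== Notes on version B (the rewrite author's own statement) =====
-- stated objective: alternative
-- what changed: Per word, replaces A's set-of-characters plus a repeated word.count scan per unique character by a single run-length walk over the sorted word (prev/run accumulator, groupby style), flagging when a finished run has length exactly 2 or 3.
import Mathlib
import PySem

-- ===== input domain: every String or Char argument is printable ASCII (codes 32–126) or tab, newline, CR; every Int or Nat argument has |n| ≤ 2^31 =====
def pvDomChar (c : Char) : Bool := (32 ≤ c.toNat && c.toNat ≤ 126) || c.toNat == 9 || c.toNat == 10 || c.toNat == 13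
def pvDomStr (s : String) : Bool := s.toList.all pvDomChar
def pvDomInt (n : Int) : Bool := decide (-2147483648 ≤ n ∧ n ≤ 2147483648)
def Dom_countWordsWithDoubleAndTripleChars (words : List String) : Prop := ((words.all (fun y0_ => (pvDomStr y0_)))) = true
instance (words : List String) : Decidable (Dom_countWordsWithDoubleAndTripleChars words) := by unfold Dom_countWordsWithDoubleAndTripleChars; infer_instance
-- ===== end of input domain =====

-- B replaces A's per-character set + repeated .count scans by a single run-length walk over the sorted word; alternative, same observable result.


-- ===== PORT A =====
-- analiseWord: sort the word, then for each unique character scan the sorted word with .count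
def analiseWord (word : String) : Bool × Bool :=
  let w := PySem.List.sorted word.toList (fun x => x) false
  let uniqueCharacters := PySem.Set.ofList w
  uniqueCharacters.foldl
    (fun st char =>
      let count := w.count char
      ((if count == 2 then true else st.1), (if count == 3 then true else st.2)))
    (false, false)

def countWordsWithDoubleAndTripleChars (words : List String) : List Int :=
  let dt := words.foldl
    (fun (acc : Int × Int) word =>
      let ht := analiseWord word
      (acc.1 + (if ht.1 then 1 else 0), acc.2 + (if ht.2 then 1 else 0)))
    (0, 0)
  [dt.1, dt.2]

-- ===== PORT B =====
-- state = (prev, run, has_two, has_three); one step of the run-length walk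
def runStep (st : Option Char × Nat × Bool × Bool) (ch : Char) : Option Char × Nat × Bool × Bool :=
  if st.1 == some ch then (st.1, st.2.1 + 1, st.2.2.1, st.2.2.2)
  else (some ch, 1, (if st.2.1 = 2 then true else st.2.2.1), (if st.2.1 = 3 then true else st.2.2.2))

-- one pass over the sorted word tracking the current run, then flush the last run
def wordRunFlags (word : String) : Bool × Bool :=
  let st := (PySem.List.sorted word.toList (fun x => x) false).foldl runStep (none, 0, false, false)
  ((if st.2.1 = 2 then true else st.2.2.1), (if st.2.1 = 3 then true else st.2.2.2))

def countWordsWithDoubleAndTripleChars_alt (words : List String) : List Int :=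
  let dt := words.foldl
    (fun (acc : Int × Int) word =>
      let ht := wordRunFlags word
      (acc.1 + (if ht.1 then 1 else 0), acc.2 + (if ht.2 then 1 else 0)))
    (0, 0)
  [dt.1, dt.2]

-- ===== PRECONDITION & SPEC =====
def Spec_countWordsWithDoubleAndTripleChars (words : List String) (out : List Int) : Prop := out = countWordsWithDoubleAndTripleChars_alt words
instance (words : List String) (out : List Int) : Decidable (Spec_countWordsWithDoubleAndTripleChars words out) := by unfold Spec_countWordsWithDoubleAndTripleChars; infer_instance

-- ===== CLAIM (what is proved, stated in full; the proofs are below) =====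
def Claim_equal_countWordsWithDoubleAndTripleChars : Prop := ∀ (words : List String), Dom_countWordsWithDoubleAndTripleChars words → Spec_countWordsWithDoubleAndTripleChars words (countWordsWithDoubleAndTripleChars words)

-- ===== LEMMAS AND PROOFS =====

-- A's pair of saturating flags folded over the unique characters is a pair of List.any
lemma foldl_flag_pair {α : Type} (p q : α → Bool) (l : List α) (a b : Bool) :
    l.foldl (fun st c => ((if p c then true else st.1), (if q c then true else st.2))) (a, b)
      = (a || l.any p, b || l.any q) := by
  induction l generalizing a b with
  | nil => simp
  | cons x xs ih =>
    simp only [List.foldl_cons, List.any_cons, ih]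
    cases hp : p x <;> cases hq : q x <;> simp

-- flag bookkeeping: flushing a pending run of length k into the saturating flag
lemma flag_flush (t : Bool) (k j : Nat) :
    (if k = j then true else t)
      = (t || decide (k = j) || decide (∃ x ∈ ([] : List Char), List.count x ([] : List Char) = j)) := by
  by_cases hk : k = j <;> simp [hk]

-- merging the flushed pending run with the recursive flags
lemma flag_merge (t : Bool) (k m j : Nat) (Q : Prop) [Decidable Q] :
    ((if k = j then true else t) || decide (m = j) || decide Q)
      = (t || decide (k = j) || decide (m = j ∨ Q)) := by
  by_cases hk : k = j <;> by_cases hm : m = j <;> by_cases hq : Q <;> simp [hk, hm, hq]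

-- folding B's step over a run of the current character only extends the run counter
lemma foldl_runStep_replicate (m : Nat) (c : Char) (rest : List Char) (k : Nat) (t2 t3 : Bool) :
    (List.replicate m c ++ rest).foldl runStep (some c, k, t2, t3)
      = rest.foldl runStep (some c, k + m, t2, t3) := by
  induction m generalizing k with
  | zero => simp
  | succ n ih =>
    simp only [List.replicate_succ, List.cons_append, List.foldl_cons, runStep]
    simp only [beq_self_eq_true, if_true]
    rw [ih]
    have h : k + 1 + n = k + (n + 1) := by omega
    rw [h]

-- main invariant: on a sorted tail whose elements all exceed the current character,
-- the fold-then-flush flags say "some completed run (incl. the pending one) has length 2 / 3",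
-- and on a sorted list run lengths are exactly counts
set_option maxRecDepth 4096 in
lemma runflags_invariant : ∀ (n : Nat) (l : List Char), l.length ≤ n →
    l.Pairwise (· ≤ ·) →
    ∀ (prev : Option Char) (k : Nat) (t2 t3 : Bool),
    (∀ x ∈ l, ∀ c, prev = some c → c < x) →
    (let st := l.foldl runStep (prev, k, t2, t3)
     ((if st.2.1 = 2 then true else st.2.2.1), (if st.2.1 = 3 then true else st.2.2.2)))
      = ((t2 || decide (k = 2) || decide (∃ x ∈ l, l.count x = 2)),
         (t3 || decide (k = 3) || decide (∃ x ∈ l, l.count x = 3))) := by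
  intro n
  induction n with
  | zero =>
    intro l hl _ prev k t2 t3 _
    have : l = [] := List.eq_nil_of_length_eq_zero (Nat.le_zero.mp hl)
    subst this
    simp only [List.foldl_nil]
    rw [Prod.mk.injEq]
    exact ⟨flag_flush t2 k 2, flag_flush t3 k 3⟩
  | succ n ih =>
    intro l hl hpw prev k t2 t3 hlt
    cases l with
    | nil =>
      simp only [List.foldl_nil]
      rw [Prod.mk.injEq]
      exact ⟨flag_flush t2 k 2, flag_flush t3 k 3⟩
    | cons a tl =>
      -- decompose the head run
      have h1 : tl.takeWhile (· == a) = List.replicate (tl.takeWhile (· == a)).length a := by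
        apply List.eq_replicate_of_mem
        intro b hb
        have := List.mem_takeWhile_imp hb
        exact eq_of_beq this
      have hdecomp : a :: tl = List.replicate (1 + (tl.takeWhile (· == a)).length) a
          ++ tl.dropWhile (· == a) := by
        rw [Nat.add_comm, List.replicate_succ, List.cons_append, ← h1,
          List.takeWhile_append_dropWhile]
      set rest := tl.dropWhile (· == a) with hrest
      set m := 1 + (tl.takeWhile (· == a)).length with hm
      -- first step starts a new run (prev < a, so prev ≠ some a)
      have hstep1 : runStep (prev, k, t2, t3) a
          = (some a, 1, (if k = 2 then true else t2), (if k = 3 then true else t3)) := by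
        unfold runStep
        have : (prev == some a) = false := by
          cases prev with
          | none => rfl
          | some c =>
            have hca := hlt a (by simp) c rfl
            simp only [beq_eq_false_iff_ne, ne_eq, Option.some.injEq]
            exact ne_of_lt hca
        simp [this]
      -- pairwise facts
      have hpw_tl : tl.Pairwise (· ≤ ·) := hpw.of_cons
      have ha_le : ∀ x ∈ tl, a ≤ x := fun x hx => (List.pairwise_cons.mp hpw).1 x hx
      have hpw_rest : rest.Pairwise (· ≤ ·) := hpw_tl.sublist (List.dropWhile_sublist _)
      have hrest_sub : ∀ x ∈ rest, x ∈ tl := fun x hx => (List.dropWhile_sublist _).mem hx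
      -- a is strictly below every element of rest
      have ha_lt_rest : ∀ x ∈ rest, a < x := by
        intro x hx
        cases hr : rest with
        | nil => rw [hr] at hx; simp at hx
        | cons b rs =>
          have hb_ne : b ≠ a := by
            have h := List.head?_dropWhile_not (· == a) tl
            rw [← hrest, hr] at h
            simpa using h
          have hab : a < b :=
            lt_of_le_of_ne (ha_le b (hrest_sub b (by rw [hr]; simp))) (Ne.symm hb_ne)
          rw [hr] at hx
          rcases List.mem_cons.mp hx with rfl | hx'
          · exact hab
          · exact lt_of_lt_of_le hab ((List.pairwise_cons.mp (hr ▸ hpw_rest)).1 x hx')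
      have ha_notin_rest : a ∉ rest := fun h => absurd (ha_lt_rest a h) (lt_irrefl a)
      -- counts in the whole list
      have hcount_a : (a :: tl).count a = m := by
        rw [hdecomp, List.count_append, List.count_replicate]
        simp [List.count_eq_zero.mpr ha_notin_rest]
      have hcount_rest : ∀ x ∈ rest, (a :: tl).count x = rest.count x := by
        intro x hx
        have hxa : x ≠ a := fun h => absurd (h ▸ ha_lt_rest x hx) (lt_irrefl a)
        rw [hdecomp, List.count_append, List.count_replicate]
        simp [Ne.symm hxa]
      -- membership split
      have hmem : ∀ x, x ∈ (a :: tl) ↔ x = a ∨ x ∈ rest := by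
        intro x
        rw [hdecomp]
        simp only [List.mem_append, List.mem_replicate]
        constructor
        · rintro (⟨_, h⟩ | h)
          · exact Or.inl h
          · exact Or.inr h
        · rintro (rfl | h)
          · exact Or.inl ⟨by omega, rfl⟩
          · exact Or.inr h
      -- run the fold: first step, then the rest of the head run, then recurse
      have hfold : (a :: tl).foldl runStep (prev, k, t2, t3)
          = rest.foldl runStep (some a, m, (if k = 2 then true else t2), (if k = 3 then true else t3)) := by
        conv_lhs => rw [hdecomp]
        rw [hm, List.replicate_add, List.append_assoc]
        simp only [List.replicate_one, List.cons_append, List.foldl_cons, hstep1,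
          List.nil_append]
        rw [foldl_runStep_replicate]
      have hlen : rest.length ≤ n := by
        have h1 : rest.length ≤ tl.length := List.length_dropWhile_le _ _
        simp only [List.length_cons] at hl
        omega
      have hrec := ih rest hlen hpw_rest (some a) m
        (if k = 2 then true else t2) (if k = 3 then true else t3)
        (fun x hx c hc => by cases hc with | refl => exact ha_lt_rest x hx)
      simp only at hrec
      rw [hfold, hrec]
      -- arithmetic on the boolean flags
      have hexists2 : (∃ x ∈ (a :: tl), (a :: tl).count x = 2) ↔ (m = 2 ∨ ∃ x ∈ rest, rest.count x = 2) := by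
        constructor
        · rintro ⟨x, hx, hc⟩
          rcases (hmem x).mp hx with rfl | hx'
          · exact Or.inl (hcount_a ▸ hc)
          · exact Or.inr ⟨x, hx', (hcount_rest x hx') ▸ hc⟩
        · rintro (h | ⟨x, hx, hc⟩)
          · exact ⟨a, by simp, by rw [hcount_a, h]⟩
          · exact ⟨x, (hmem x).mpr (Or.inr hx), by rw [hcount_rest x hx, hc]⟩
      have hexists3 : (∃ x ∈ (a :: tl), (a :: tl).count x = 3) ↔ (m = 3 ∨ ∃ x ∈ rest, rest.count x = 3) := by
        constructor
        · rintro ⟨x, hx, hc⟩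
          rcases (hmem x).mp hx with rfl | hx'
          · exact Or.inl (hcount_a ▸ hc)
          · exact Or.inr ⟨x, hx', (hcount_rest x hx') ▸ hc⟩
        · rintro (h | ⟨x, hx, hc⟩)
          · exact ⟨a, by simp, by rw [hcount_a, h]⟩
          · exact ⟨x, (hmem x).mpr (Or.inr hx), by rw [hcount_rest x hx, hc]⟩
      clear hfold hrec hcount_a hcount_rest hmem hlen hstep1 hdecomp h1 hlt hpw hl
        hpw_tl ha_le hpw_rest hrest_sub ha_lt_rest ha_notin_rest ih
      clear_value rest m
      clear hrest hm
      rw [Prod.mk.injEq]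
      refine ⟨?_, ?_⟩
      · exact (flag_merge t2 k m 2 (∃ x ∈ rest, List.count x rest = 2)).trans
          (congrArg (fun b => t2 || decide (k = 2) || b) (decide_eq_decide.mpr hexists2.symm))
      · exact (flag_merge t3 k m 3 (∃ x ∈ rest, List.count x rest = 3)).trans
          (congrArg (fun b => t3 || decide (k = 3) || b) (decide_eq_decide.mpr hexists3.symm))

-- both per-word analyses compute "some character occurs exactly 2 / exactly 3 times"
set_option maxRecDepth 4096 in
lemma flags_eq (word : String) : analiseWord word = wordRunFlags word := by
  unfold analiseWord wordRunFlags
  set w := PySem.List.sorted word.toList (fun x => x) false with hw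
  have hA := foldl_flag_pair (fun c => w.count c == 2) (fun c => w.count c == 3)
    (PySem.Set.ofList w) false false
  simp only at hA
  rw [hA]
  have hpw : w.Pairwise (· ≤ ·) := by
    have := PySem.List.sorted_pairwise word.toList (fun x => x) (κ := Char)
    exact this
  have hB := runflags_invariant w.length w le_rfl hpw none 0 false false
    (fun x _ c hc => by cases hc)
  simp only at hB
  rw [hB]
  rw [Prod.mk.injEq]
  refine ⟨?_, ?_⟩
  · rw [← Bool.coe_iff_coe]
    simp only [Bool.false_or, Bool.or_eq_true, List.any_eq_true, decide_eq_true_eq,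
      PySem.Set.mem_ofList, beq_iff_eq]
    constructor
    · rintro ⟨c, hc, h⟩; exact Or.inr ⟨c, hc, h⟩
    · rintro (h | ⟨c, hc, h⟩)
      · omega
      · exact ⟨c, hc, h⟩
  · rw [← Bool.coe_iff_coe]
    simp only [Bool.false_or, Bool.or_eq_true, List.any_eq_true, decide_eq_true_eq,
      PySem.Set.mem_ofList, beq_iff_eq]
    constructor
    · rintro ⟨c, hc, h⟩; exact Or.inr ⟨c, hc, h⟩
    · rintro (h | ⟨c, hc, h⟩)
      · omega
      · exact ⟨c, hc, h⟩

-- ===== VERDICT (by name: the statement is the Claim_ definition above) =====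
theorem countWordsWithDoubleAndTripleChars_spec : Claim_equal_countWordsWithDoubleAndTripleChars := by
  intro words _
  show countWordsWithDoubleAndTripleChars words = countWordsWithDoubleAndTripleChars_alt words
  unfold countWordsWithDoubleAndTripleChars countWordsWithDoubleAndTripleChars_alt
  simp only [flags_eq]
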